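-- pv_equiv track=rewrite | github.com/Travos-Dunn/CIK-Lookup | cik_lookup.py | extract_pre_sections
-- ===== SOURCE A (Python) =====
-- def extract_pre_sections(html):
--     """
--     Parses HTML to extract the content of all `<pre>` elements.
--
--     The SEC page information in `<pre>` elements is extracted as follows:
--         - pre_sections[0]: Header (column descriptions)
--         - pre_sections[1]: Main table where each line is a CIK code, Company, and Name
--
--     :param html: HTML object
--     :return: List of strings corresponding to ``<pre>`` element(s)
--     """
--
--     pre_sections = []
--     start_tag = "<pre>"
--     end_tag = "</pre>"
--     start = html.find(start_tag)
--
--     # Locate and extract all <pre> elements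
--     while start != -1:
--         end = html.find(end_tag, start)
--         if end != -1:
--             # Extract content between <pre> tags and strip extra whitepsace
--             pre_content = html[start + len(start_tag):end].strip()
--             pre_sections.append(pre_content)
--             start = html.find(start_tag, end)
--         else:
--             break # No matching </pre> is found; error in HTML?
--
--     return pre_sections
-- ===== SOURCE B (Python) =====
-- def extract_pre_sections(html):
--     """Two staged passes: first index every occurrence of each tag, then pair
--     the two sorted position lists with two pointers (no interleaved scanning)."""
--     def positions(tag):
--         pos = []
--         i = html.find(tag)
--         while i != -1:
--             pos.append(i)
--             i = html.find(tag, i + 1)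
--         return pos
--
--     opens = positions("<pre>")
--     closes = positions("</pre>")
--     sections = []
--     j = 0
--     cursor = 0
--     for o in opens:
--         if o < cursor:
--             continue
--         while j < len(closes) and closes[j] < o:
--             j += 1
--         if j == len(closes):
--             break
--         c = closes[j]
--         sections.append(html[o + 5:c].strip())
--         cursor = c
--     return sections
-- ===== Notes on version B (the rewrite author's own statement) =====
-- stated objective: alternative
-- what changed: B replaces A's single interleaved scan (alternating find of open/close tag with index bookkeeping) by two staged passes that first index ALL occurrences of each tag into two sorted position lists, then pair them with a two-pointer merge over those lists.
import Mathlib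
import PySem

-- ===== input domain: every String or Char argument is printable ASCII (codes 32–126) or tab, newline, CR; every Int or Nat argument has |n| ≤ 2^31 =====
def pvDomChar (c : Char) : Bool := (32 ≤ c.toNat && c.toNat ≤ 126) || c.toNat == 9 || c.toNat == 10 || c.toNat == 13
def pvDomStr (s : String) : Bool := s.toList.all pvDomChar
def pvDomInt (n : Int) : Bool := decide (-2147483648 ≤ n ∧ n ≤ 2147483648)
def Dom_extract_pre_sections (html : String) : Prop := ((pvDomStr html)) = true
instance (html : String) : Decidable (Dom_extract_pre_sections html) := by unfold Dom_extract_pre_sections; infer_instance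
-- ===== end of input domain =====

-- B replaces A's interleaved scan by two staged indexing passes (all tag positions) plus a two-pointer pairing pass; result proved identical on all inputs.

def preTag : List Char := ['<', 'p', 'r', 'e', '>']
def postTag : List Char := ['<', '/', 'p', 'r', 'e', '>']

-- ===== PORT A =====
-- A's while loop over absolute indices, with fuel (the loop advances by ≥ 11 each turn).
def extractGoA (html : List Char) (start : Int) (acc : List (List Char)) : Nat → List (List Char)
  | 0 => acc
  | Nat.succ fuel =>
    if start = -1 then acc
    else
      let e := PySem.Chars.findFrom html postTag start none
      if e ≠ -1 then
        extractGoA html (PySem.Chars.findFrom html preTag e none)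
          (acc ++ [PySem.Chars.strip (PySem.Chars.slice html (some (start + 5)) (some e))]) fuel
      else acc

def extract_pre_sections (html : String) : List String :=
  let h := html.toList
  (extractGoA h (PySem.Chars.find h preTag) [] (h.length + 2)).map String.ofList

-- ===== PORT B =====
-- Source B's 'positions' helper: i = html.find(tag); while i != -1: pos.append(i); i = html.find(tag, i+1)
def positionsGo (h tag : List Char) (i : Int) : Nat → List Int
  | 0 => []
  | Nat.succ fuel =>
    if i = -1 then []
    else i :: positionsGo h tag (PySem.Chars.findFrom h tag (i + 1) none) fuel

def positionsB (h tag : List Char) : List Int :=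
  positionsGo h tag (PySem.Chars.find h tag) (h.length + 2)

-- Source B's inner 'while j < len(closes) and closes[j] < o: j += 1'
def advanceB (closes : List Int) (o : Int) (j : Nat) : Nat :=
  if hj : j < closes.length then
    if closes[j] < o then advanceB closes o (j + 1) else j
  else j
termination_by closes.length - j

-- Source B's 'for o in opens' loop with state (j, cursor, sections)
def pairGo (h : List Char) (closes : List Int) : List Int → Nat → Int → List (List Char) → List (List Char)
  | [], _, _, acc => acc
  | o :: os, j, cursor, acc =>
    if o < cursor then pairGo h closes os j cursor acc
    else
      let j' := advanceB closes o j
      if j' = closes.length then acc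
      else
        let c := closes.getD j' 0
        pairGo h closes os j' c (acc ++ [PySem.Chars.strip (PySem.Chars.slice h (some (o + 5)) (some c))])

def extract_pre_sections_alt (html : String) : List String :=
  let h := html.toList
  (pairGo h (positionsB h postTag) (positionsB h preTag) 0 0 []).map String.ofList

-- ===== PRECONDITION & SPEC =====
def Spec_extract_pre_sections (html : String) (out : List String) : Prop := out = extract_pre_sections_alt html
instance (html : String) (out : List String) : Decidable (Spec_extract_pre_sections html out) := by unfold Spec_extract_pre_sections; infer_instance

-- ===== CLAIM (what is proved, stated in full; the proofs are below) =====
def Claim_equal_extract_pre_sections : Prop := ∀ (html : String), Dom_extract_pre_sections html → Spec_extract_pre_sections html (extract_pre_sections html)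

-- ===== LEMMAS AND PROOFS =====

-- all start positions of occurrences of tag in h, in increasing order
def occ (h tag : List Char) : List Nat :=
  (List.range (h.length + 1)).filter (fun n => decide (tag <+: h.drop n))

-- the occurrences at position ≥ k
def firstGe (h tag : List Char) (k : Nat) : List Nat :=
  (occ h tag).filter (fun n => decide (k ≤ n))

theorem mem_occ {h tag : List Char} {n : Nat} :
    n ∈ occ h tag ↔ n < h.length + 1 ∧ tag <+: h.drop n := by
  simp [occ]

theorem occ_sorted (h tag : List Char) : (occ h tag).Pairwise (· < ·) :=
  List.Pairwise.sublist List.filter_sublist List.pairwise_lt_range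

theorem mem_occ_of_prefix {h tag : List Char} {n : Nat} (htag : tag ≠ [])
    (hp : tag <+: h.drop n) : n ∈ occ h tag := by
  rw [mem_occ]
  refine ⟨?_, hp⟩
  by_contra hn
  have : h.drop n = [] := List.drop_eq_nil_of_le (by omega)
  rw [this] at hp
  exact htag (List.prefix_nil.mp hp)

theorem mem_occ_lt {h tag : List Char} {n : Nat} (htag : tag ≠ [])
    (hn : n ∈ occ h tag) : n < h.length := by
  have hp := (mem_occ.mp hn).2
  by_contra hc
  have : h.drop n = [] := List.drop_eq_nil_of_le (by omega)
  rw [this] at hp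
  exact htag (List.prefix_nil.mp hp)

theorem head?_filter_sorted {l : List Nat} {p : Nat → Bool} {m : Nat}
    (hs : l.Pairwise (· < ·)) (hm : m ∈ l) (hp : p m = true)
    (hmin : ∀ x ∈ l, p x = true → m ≤ x) :
    (l.filter p).head? = some m := by
  induction l with
  | nil => cases hm
  | cons a t ih =>
    rcases List.mem_cons.mp hm with rfl | hmt
    · simp [hp]
    · have hpa : p a = false := by
        by_contra hc
        have h1 : m ≤ a := hmin a (List.mem_cons_self) (by simpa using hc)
        have h2 : a < m := (List.pairwise_cons.mp hs).1 m hmt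
        omega
      rw [List.filter_cons, hpa]
      exact ih (List.pairwise_cons.mp hs).2 hmt
        (fun x hx hpx => hmin x (List.mem_cons_of_mem a hx) hpx)

-- findFrom from k is the head of firstGe (or -1)
theorem findFrom_firstGe (h tag : List Char) (k : Nat) (htag : tag ≠ []) (hk : k ≤ h.length) :
    PySem.Chars.findFrom h tag (k : Int) none =
      match firstGe h tag k with
      | [] => -1
      | n :: _ => (n : Int) := by
  by_cases hneg : PySem.Chars.findFrom h tag (k : Int) none = -1
  · have hnin : ¬ tag <:+: h.drop k :=
      (PySem.Chars.findFrom_natCast_eq_neg_one_iff h tag k hk).mp hneg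
    have hfe : firstGe h tag k = [] := by
      rw [firstGe, List.filter_eq_nil_iff]
      intro n hn hdec
      have hkn : k ≤ n := by simpa using hdec
      have hp := (mem_occ.mp hn).2
      have : h.drop n = (h.drop k).drop (n - k) := by
        rw [List.drop_drop]; congr 1; omega
      rw [this] at hp
      exact hnin (hp.isInfix.trans (List.drop_suffix _ _).isInfix)
    rw [hfe, hneg]
  · obtain ⟨hkr, hp, hmin⟩ := PySem.Chars.findFrom_natCast_spec h tag k hk hneg
    set r := PySem.Chars.findFrom h tag (k : Int) none with hr
    have hr0 : 0 ≤ r := by omega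
    have hhead : (firstGe h tag k).head? = some r.toNat := by
      apply head?_filter_sorted (occ_sorted h tag) (mem_occ_of_prefix htag hp)
        (by simp; omega)
      intro x hx hpx
      by_contra hc
      exact hmin x (by simpa using hpx) (by omega) (mem_occ.mp hx).2
    obtain ⟨t, ht⟩ : ∃ t, firstGe h tag k = r.toNat :: t := by
      cases hfg : firstGe h tag k with
      | nil => rw [hfg] at hhead; simp at hhead
      | cons a t => rw [hfg] at hhead; simp at hhead; exact ⟨t, by rw [hhead]⟩
    rw [ht]
    simp
    omega

-- peeling the head off firstGe
theorem firstGe_tail {l : List Nat} {k m : Nat} {rest : List Nat}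
    (hs : l.Pairwise (· < ·))
    (hf : l.filter (fun n => decide (k ≤ n)) = m :: rest) :
    l.filter (fun n => decide (m + 1 ≤ n)) = rest := by
  induction l with
  | nil => simp at hf
  | cons a t ih =>
    have hmem : m ∈ (a :: t).filter (fun n => decide (k ≤ n)) := by
      rw [hf]; exact List.mem_cons_self
    have hm : m ∈ a :: t := List.mem_of_mem_filter hmem
    by_cases hka : k ≤ a
    · rw [List.filter_cons_of_pos (by simpa using hka)] at hf
      injection hf with ha hrest
      subst ha
      rw [List.filter_cons_of_neg (by simp), ← hrest]
      exact List.filter_congr (fun x hx => by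
        have : a < x := (List.pairwise_cons.mp hs).1 x hx
        simp; omega)
    · rw [List.filter_cons_of_neg (by simpa using hka)] at hf
      have hmt : m ∈ t := by
        have := List.mem_of_mem_filter (hf ▸ List.mem_cons_self : m ∈ t.filter _)
        exact this
      have hkm : k ≤ m := by
        have := List.of_mem_filter (hf ▸ List.mem_cons_self : m ∈ t.filter _)
        simpa using this
      rw [List.filter_cons_of_neg (by simp; omega)]
      exact ih (List.pairwise_cons.mp hs).2 hf

-- positionsGo computes the (cast) list of occurrences ≥ k
theorem positionsGo_eq (h tag : List Char) (htag : tag ≠ []) :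
    ∀ (fuel k : Nat), k ≤ h.length → (firstGe h tag k).length < fuel →
      positionsGo h tag (PySem.Chars.findFrom h tag (k : Int) none) fuel
        = (firstGe h tag k).map (fun n : Nat => (n : Int)) := by
  intro fuel
  induction fuel with
  | zero => intro k hk hf; omega
  | succ fuel ih =>
    intro k hk hf
    rw [findFrom_firstGe h tag k htag hk]
    cases hfg : firstGe h tag k with
    | nil => simp [positionsGo]
    | cons m rest =>
      have hm : m ∈ occ h tag := List.mem_of_mem_filter (hfg ▸ List.mem_cons_self)
      have hmlt : m < h.length := mem_occ_lt htag hm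
      have hrest : firstGe h tag (m + 1) = rest := firstGe_tail (occ_sorted h tag) hfg
      simp only [positionsGo]
      rw [if_neg (by omega : ¬ ((m : Int) = -1))]
      rw [show (m : Int) + 1 = ((m + 1 : Nat) : Int) by push_cast; ring]
      rw [ih (m + 1) (by omega) (by rw [hrest]; rw [hfg] at hf; simp at hf; omega)]
      rw [hrest]
      simp

-- ── advanceB facts ──
theorem advanceB_le (closes : List Int) (o : Int) :
    ∀ j, j ≤ closes.length → advanceB closes o j ≤ closes.length := by
  have aux : ∀ n j, closes.length - j ≤ n → j ≤ closes.length → advanceB closes o j ≤ closes.length := by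
    intro n
    induction n with
    | zero =>
      intro j hj hjl
      rw [advanceB]
      split
      · omega
      · omega
    | succ n ih =>
      intro j hj hjl
      rw [advanceB]
      split
      · rename_i hlt
        split
        · exact ih (j + 1) (by omega) (by omega)
        · omega
      · omega
  intro j hjl
  exact aux closes.length j (by omega) hjl

theorem advanceB_take (closes : List Int) (o : Int) :
    ∀ j, (∀ x ∈ closes.take j, x < o) →
      ∀ x ∈ closes.take (advanceB closes o j), x < o := by
  have aux : ∀ n j, closes.length - j ≤ n → (∀ x ∈ closes.take j, x < o) →
      ∀ x ∈ closes.take (advanceB closes o j), x < o := by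
    intro n
    induction n with
    | zero =>
      intro j hj htake
      rw [advanceB]
      split
      · omega
      · exact htake
    | succ n ih =>
      intro j hj htake
      rw [advanceB]
      split
      · rename_i hlt
        split
        · rename_i hc
          refine ih (j + 1) (by omega) ?_
          intro x hx
          rw [List.take_add_one] at hx
          rcases List.mem_append.mp hx with hx' | hx'
          · exact htake x hx'
          · have : x = closes[j] := by
              simpa [List.getElem?_eq_getElem hlt] using hx'
            omega
        · exact htake
      · exact htake
  intro j
  exact aux closes.length j (by omega)

theorem advanceB_get (closes : List Int) (o : Int) :
    ∀ j (hlt : advanceB closes o j < closes.length), o ≤ closes[advanceB closes o j] := by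
  have aux : ∀ n j, closes.length - j ≤ n →
      ∀ (hlt : advanceB closes o j < closes.length), o ≤ closes[advanceB closes o j] := by
    intro n
    induction n with
    | zero =>
      intro j hj
      have heq : advanceB closes o j = j := by
        rw [advanceB]
        split
        · omega
        · rfl
      simp only [heq]
      intro hlt
      omega
    | succ n ih =>
      intro j hj
      by_cases hjl : j < closes.length
      · by_cases hc : closes[j] < o
        · have heq : advanceB closes o j = advanceB closes o (j + 1) := by
            rw [advanceB]
            rw [dif_pos hjl, if_pos hc]
          simp only [heq]
          exact ih (j + 1) (by omega)
        · have heq : advanceB closes o j = j := by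
            rw [advanceB]
            rw [dif_pos hjl, if_neg hc]
          simp only [heq]
          intro _
          omega
      · have heq : advanceB closes o j = j := by
          rw [advanceB, dif_neg hjl]
        simp only [heq]
        intro hlt
        omega
  intro j
  exact aux closes.length j (by omega)

-- a sorted list splits at advanceB: the suffix is exactly the elements ≥ o
theorem drop_eq_filter_ge {closes : List Int} {o : Int} {j : Nat}
    (hs : closes.Pairwise (· < ·))
    (htake : ∀ x ∈ closes.take j, x < o) :
    closes.drop (advanceB closes o j) = closes.filter (fun c => decide (o ≤ c)) := by
  have h1 : ∀ x ∈ closes.take (advanceB closes o j), x < o := advanceB_take closes o j htake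
  have h2 : ∀ x ∈ closes.drop (advanceB closes o j), o ≤ x := by
    intro x hx
    by_cases hlt : advanceB closes o j < closes.length
    · have hget := advanceB_get closes o j hlt
      rw [List.drop_eq_getElem_cons hlt] at hx
      rcases List.mem_cons.mp hx with rfl | hx'
      · exact hget
      · have hsp := hs
        rw [← List.take_append_drop (advanceB closes o j + 1) closes] at hsp
        have hab := (List.pairwise_append.mp hsp).2.2
        have hmem : closes[advanceB closes o j] ∈ closes.take (advanceB closes o j + 1) := by
          rw [List.take_add_one, List.getElem?_eq_getElem hlt]
          exact List.mem_append_right _ (by simp)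
        have := hab _ hmem x hx'
        omega
    · rw [List.drop_eq_nil_of_le (by omega)] at hx
      cases hx
  symm
  conv_lhs => rw [← List.take_append_drop (advanceB closes o j) closes]
  rw [List.filter_append,
    List.filter_eq_nil_iff.mpr (by intro x hx; have := h1 x hx; simp; omega),
    List.filter_eq_self.mpr (by intro x hx; have := h2 x hx; simp; omega)]
  simp

theorem filter_absorb (l : List Nat) (a b : Nat) (hab : a ≤ b) :
    (l.filter (fun n => decide (a ≤ n))).filter (fun n => decide (b ≤ n))
      = l.filter (fun n => decide (b ≤ n)) := by
  rw [List.filter_filter]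
  refine List.filter_congr ?_
  intro x _
  by_cases hb : b ≤ x
  · simp [hb]; omega
  · simp [hb]

theorem not_pre_and_post {h : List Char} {m : Nat}
    (hp : preTag <+: h.drop m) (hq : postTag <+: h.drop m) : False := by
  obtain ⟨u, hu⟩ := hp
  obtain ⟨v, hv⟩ := hq
  rw [← hu] at hv
  simp [preTag, postTag] at hv

-- ── main simulation ──
theorem sim (h : List Char) :
    ∀ (S : List Nat) (fuel j cursor : Nat) (acc : List (List Char)),
      S.Pairwise (· < ·) →
      S.filter (fun n => decide (cursor ≤ n)) = firstGe h preTag cursor →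
      j ≤ ((occ h postTag).map (fun n : Nat => (n : Int))).length →
      (∀ x ∈ ((occ h postTag).map (fun n : Nat => (n : Int))).take j, x < (cursor : Int)) →
      cursor ≤ h.length →
      S.length + 1 ≤ fuel →
      extractGoA h (PySem.Chars.findFrom h preTag (cursor : Int) none) acc fuel
        = pairGo h ((occ h postTag).map (fun n : Nat => (n : Int)))
            (S.map (fun n : Nat => (n : Int))) j (cursor : Int) acc := by
  intro S
  induction S with
  | nil =>
    intro fuel j cursor acc _ hfil hj htake hcur hfuel
    rw [findFrom_firstGe h preTag cursor (by simp [preTag]) hcur, ← hfil]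
    cases fuel with
    | zero => omega
    | succ f => simp [extractGoA, pairGo]
  | cons m S' ih =>
    intro fuel j cursor acc hs hfil hj htake hcur hfuel
    set closesI := (occ h postTag).map (fun n : Nat => (n : Int)) with hCdef
    by_cases hmc : m < cursor
    · rw [List.map_cons, pairGo, if_pos (by exact_mod_cast hmc)]
      rw [List.filter_cons_of_neg (by simp; omega)] at hfil
      exact ih fuel j cursor acc (List.pairwise_cons.mp hs).2 hfil hj htake hcur
        (by simp at hfuel ⊢; omega)
    · have hcm : cursor ≤ m := by omega
      rw [List.filter_cons_of_pos (by simp; omega)] at hfil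
      have hfg : firstGe h preTag cursor = m :: S'.filter (fun n => decide (cursor ≤ n)) :=
        hfil.symm
      have hmOcc : m ∈ occ h preTag := List.mem_of_mem_filter (hfg ▸ List.mem_cons_self)
      have hmlt : m < h.length := mem_occ_lt (by simp [preTag]) hmOcc
      have hstart : PySem.Chars.findFrom h preTag (cursor : Int) none = (m : Int) := by
        rw [findFrom_firstGe h preTag cursor (by simp [preTag]) hcur, hfg]
      cases fuel with
      | zero => simp at hfuel
      | succ f =>
        rw [hstart]
        simp only [extractGoA]
        rw [if_neg (show ¬((m : Int) = -1) by omega)]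
        have hE := findFrom_firstGe h postTag m (by simp [postTag]) (le_of_lt hmlt)
        have hCpair : closesI.Pairwise (· < ·) :=
          List.Pairwise.map _ (fun a b hab => by exact_mod_cast hab) (occ_sorted h postTag)
        have htakem : ∀ x ∈ closesI.take j, x < (m : Int) := by
          intro x hx
          have h1 := htake x hx
          have h2 : (cursor : Int) ≤ (m : Int) := by exact_mod_cast hcm
          omega
        have hdrop : closesI.drop (advanceB closesI (m : Int) j)
            = closesI.filter (fun c => decide ((m : Int) ≤ c)) :=
          drop_eq_filter_ge hCpair htakem
        have hCfil : closesI.filter (fun c => decide ((m : Int) ≤ c))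
            = (firstGe h postTag m).map (fun n : Nat => (n : Int)) := by
          rw [hCdef, List.filter_map, firstGe]
          congr 1
          exact List.filter_congr (by intro x _; simp)
        cases hCfg : firstGe h postTag m with
        | nil =>
          have he : PySem.Chars.findFrom h postTag (m : Int) none = -1 := by
            rw [hE, hCfg]
          rw [he]
          rw [if_neg (by simp : ¬((-1 : Int) ≠ -1))]
          rw [List.map_cons, pairGo, if_neg (by exact_mod_cast hmc)]
          have hjlen : advanceB closesI (m : Int) j = closesI.length := by
            have h1 : closesI.drop (advanceB closesI (m : Int) j) = [] := by
              rw [hdrop, hCfil, hCfg, List.map_nil]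
            have h2 := advanceB_le closesI (m : Int) j hj
            have h3 := List.drop_eq_nil_iff.mp h1
            omega
          rw [if_pos hjlen]
        | cons c C' =>
          have he : PySem.Chars.findFrom h postTag (m : Int) none = (c : Int) := by
            rw [hE, hCfg]
          have hcOcc : c ∈ occ h postTag := List.mem_of_mem_filter (hCfg ▸ List.mem_cons_self)
          have hmcle : m ≤ c := by
            have := List.of_mem_filter (hCfg ▸ List.mem_cons_self : c ∈ (occ h postTag).filter _)
            simpa using this
          have hmltc : m < c := by
            rcases Nat.lt_or_ge m c with h' | h'
            · exact h'
            · exfalso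
              have hmeq : m = c := by omega
              exact not_pre_and_post (mem_occ.mp hmOcc).2 (hmeq ▸ (mem_occ.mp hcOcc).2)
          have hclt : c < h.length := mem_occ_lt (by simp [postTag]) hcOcc
          have hdc : closesI.drop (advanceB closesI (m : Int) j)
              = (c : Int) :: C'.map (fun n : Nat => (n : Int)) := by
            rw [hdrop, hCfil, hCfg, List.map_cons]
          have hj'lt : advanceB closesI (m : Int) j < closesI.length := by
            by_contra hge
            rw [List.drop_eq_nil_of_le (by omega)] at hdc
            cases hdc
          have hgetc : closesI[advanceB closesI (m : Int) j] = (c : Int) := by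
            rw [List.drop_eq_getElem_cons hj'lt] at hdc
            exact (List.cons.injEq _ _ _ _ ▸ hdc).1
          rw [he]
          rw [if_pos (show ((c : Int) ≠ -1) by omega)]
          rw [List.map_cons, pairGo, if_neg (by exact_mod_cast hmc)]
          rw [if_neg (by omega : ¬ advanceB closesI (m : Int) j = closesI.length)]
          have hgd : closesI.getD (advanceB closesI (m : Int) j) 0 = (c : Int) := by
            rw [List.getD_eq_getElem?_getD, List.getElem?_eq_getElem hj'lt, Option.getD_some,
              hgetc]
          rw [hgd]
          -- the new filter invariant
          have hfg' : (occ h preTag).filter (fun n => decide (cursor ≤ n))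
              = m :: S'.filter (fun n => decide (cursor ≤ n)) := by
            rw [← hfg]; rfl
          have h1 : (occ h preTag).filter (fun n => decide (m + 1 ≤ n))
              = S'.filter (fun n => decide (cursor ≤ n)) :=
            firstGe_tail (occ_sorted h preTag) hfg'
          have hfilc : S'.filter (fun n => decide (c ≤ n)) = firstGe h preTag c := by
            have h2 : (S'.filter (fun n => decide (cursor ≤ n))).filter
                (fun n => decide (c ≤ n)) = S'.filter (fun n => decide (c ≤ n)) :=
              filter_absorb S' cursor c (by omega)
            rw [← h2, ← h1, filter_absorb (occ h preTag) (m + 1) c (by omega)]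
            rfl
          refine ih f (advanceB closesI (m : Int) j) c _
            (List.pairwise_cons.mp hs).2 hfilc
            (advanceB_le closesI (m : Int) j hj) ?_ (le_of_lt hclt)
            (by simp at hfuel ⊢; omega)
          intro x hx
          have h3 := advanceB_take closesI (m : Int) j htakem x hx
          have h4 : (m : Int) < (c : Int) := by exact_mod_cast hmltc
          omega

-- ===== VERDICT (by name: the statement is the Claim_ definition above) =====
theorem occ_length_le (h tag : List Char) : (occ h tag).length ≤ h.length + 1 :=
  le_trans (List.length_filter_le _ _) (by simp)

theorem positionsB_eq (h tag : List Char) (htag : tag ≠ []) :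
    positionsB h tag = (occ h tag).map (fun n : Nat => (n : Int)) := by
  unfold positionsB
  rw [← PySem.Chars.findFrom_zero, show (0 : Int) = ((0 : Nat) : Int) from rfl]
  rw [positionsGo_eq h tag htag _ 0 (by omega)
    (by calc (firstGe h tag 0).length ≤ (occ h tag).length := List.length_filter_le _ _
          _ < h.length + 2 := by have := occ_length_le h tag; omega)]
  congr 1
  exact List.filter_eq_self.mpr (by simp)

theorem extract_pre_sections_spec : Claim_equal_extract_pre_sections := by
  intro html _
  unfold Spec_extract_pre_sections extract_pre_sections extract_pre_sections_alt
  dsimp only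
  rw [positionsB_eq html.toList preTag (by simp [preTag]),
    positionsB_eq html.toList postTag (by simp [postTag])]
  congr 1
  have hsim := sim html.toList (occ html.toList preTag) (html.toList.length + 2) 0 0 []
    (occ_sorted html.toList preTag)
    rfl
    (by omega) (by simp) (by omega)
    (by have := occ_length_le html.toList preTag; omega)
  simpa using hsim
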